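-- pv_equiv track=rewrite | github.com/AnZuev/Practical_AI_bot | big_xo/libs.py | get_max_element_index_from_2d_matrix
-- ===== SOURCE A (Python) =====
-- def get_max_element_index_from_2d_matrix(matrix):
--     max_element = matrix[0][0]
--     result = (0, 0)
--     for i, row in enumerate(matrix):
--         for j, element in enumerate(row):
--             if element > max_element:
--                 result = (i, j)
--                 max_element = element
--     return result
-- ===== SOURCE B (Python) =====
-- def get_max_element_index_from_2d_matrix(matrix):
--     # Two staged passes: find the global maximum value first,
--     # then locate its first row-major occurrence.
--     m = max(max(row) for row in matrix if row)
--     for i, row in enumerate(matrix):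
--         if m in row:
--             return (i, row.index(m))
-- ===== Notes on version B (the rewrite author's own statement) =====
-- stated objective: alternative
-- what changed: A is a single stateful scan that tracks the running maximum and its index in one pass; B is value/position-decoupled two-phase search: pass 1 computes only the global maximum value (max of row maxima), pass 2 searches for that value's first row-major occurrence with membership test plus list.index, carrying no running state.
import Mathlib
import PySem

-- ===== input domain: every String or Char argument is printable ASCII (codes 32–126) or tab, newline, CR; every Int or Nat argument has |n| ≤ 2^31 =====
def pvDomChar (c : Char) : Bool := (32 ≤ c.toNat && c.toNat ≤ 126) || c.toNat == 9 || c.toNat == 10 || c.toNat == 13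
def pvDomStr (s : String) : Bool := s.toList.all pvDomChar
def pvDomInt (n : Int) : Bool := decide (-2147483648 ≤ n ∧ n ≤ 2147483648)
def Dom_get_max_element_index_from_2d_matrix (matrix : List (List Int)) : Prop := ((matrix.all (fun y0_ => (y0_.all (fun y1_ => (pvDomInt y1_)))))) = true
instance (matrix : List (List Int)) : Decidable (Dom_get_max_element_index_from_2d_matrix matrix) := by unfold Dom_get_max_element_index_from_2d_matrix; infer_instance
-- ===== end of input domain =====

-- B replaces A's single stateful running-max scan by a two-phase search (global max value first, then its first row-major occurrence); same cost, alternative decomposition. Pre_ excludes matrix = [] and empty first row, where Python A raises IndexError.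

-- ===== PORT A =====
-- inner loop: for j, element in enumerate(row)
def goAInner (i : Nat) (j : Nat) (st : Int × (Int × Int)) : List Int → Int × (Int × Int)
  | [] => st
  | e :: rest => goAInner i (j + 1) (if e > st.1 then (e, ((i : Int), (j : Int))) else st) rest

-- outer loop: for i, row in enumerate(matrix)
def goA (i : Nat) (st : Int × (Int × Int)) : List (List Int) → Int × (Int × Int)
  | [] => st
  | row :: rows => goA (i + 1) (goAInner i 0 st row) rows

def get_max_element_index_from_2d_matrix (matrix : List (List Int)) : Int × Int :=
  match (PySem.List.pyGet? matrix 0).bind (fun r => PySem.List.pyGet? r 0) with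
  | none => (0, 0)  -- Python raises IndexError here; excluded by Pre_
  | some m0 => (goA 0 (m0, ((0 : Int), (0 : Int))) matrix).2

-- ===== PORT B =====
-- max(row): only called on nonempty rows (the generator filters with 'if row')
def rowMax (row : List Int) : Int := (PySem.List.max? row (fun y => y)).getD 0

-- m = max(max(row) for row in matrix if row)
def gmax (matrix : List (List Int)) : Option Int :=
  PySem.List.max? ((matrix.filter (fun r => !r.isEmpty)).map rowMax) (fun y => y)

-- for i, row in enumerate(matrix): if m in row: return (i, row.index(m))
def findB (m : Int) (i : Nat) : List (List Int) → Int × Int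
  | [] => (0, 0)  -- Python falls off the loop (returns None); unreachable when m is the global max
  | row :: rows =>
      if m ∈ row then ((i : Int), (((PySem.List.index? row m).getD 0 : Nat) : Int))
      else findB m (i + 1) rows

def get_max_element_index_from_2d_matrix_alt (matrix : List (List Int)) : Int × Int :=
  match gmax matrix with
  | none => (0, 0)  -- Python max raises ValueError here; excluded by Pre_
  | some m => findB m 0 matrix

-- ===== PRECONDITION & SPEC =====
-- Pre_ excludes exactly the inputs where Python A raises IndexError: an empty matrix or an empty first row.
def Pre_get_max_element_index_from_2d_matrix (matrix : List (List Int)) : Prop :=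
  matrix ≠ [] ∧ matrix.headD [] ≠ []
instance (matrix : List (List Int)) : Decidable (Pre_get_max_element_index_from_2d_matrix matrix) := by unfold Pre_get_max_element_index_from_2d_matrix; infer_instance
def pvWitness_get_max_element_index_from_2d_matrix : List (List Int) := [[1, 2], [3]]

def Spec_get_max_element_index_from_2d_matrix (matrix : List (List Int)) (out : Int × Int) : Prop := out = get_max_element_index_from_2d_matrix_alt matrix
instance (matrix : List (List Int)) (out : Int × Int) : Decidable (Spec_get_max_element_index_from_2d_matrix matrix out) := by unfold Spec_get_max_element_index_from_2d_matrix; infer_instance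

-- ===== CLAIM (what is proved, stated in full; the proofs are below) =====
def Claim_equal_get_max_element_index_from_2d_matrix : Prop := ∀ (matrix : List (List Int)), Dom_get_max_element_index_from_2d_matrix matrix → Pre_get_max_element_index_from_2d_matrix matrix → Spec_get_max_element_index_from_2d_matrix matrix (get_max_element_index_from_2d_matrix matrix)

-- ===== LEMMAS AND PROOFS =====

-- first index of m in a list (reference function used by the proofs)
def fidx (m : Int) : List Int → Option Nat
  | [] => none
  | e :: l => if e = m then some 0 else (fidx m l).map (· + 1)

-- first row-major position of m in a matrix
def fpos (m : Int) : List (List Int) → Option (Nat × Nat)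
  | [] => none
  | row :: rows =>
      match fidx m row with
      | some j => some (0, j)
      | none => (fpos m rows).map (fun p => (p.1 + 1, p.2))

theorem foldl_max_or (l : List Int) (a : Int) : l.foldl max a = a ∨ l.foldl max a ∈ l := by
  induction l generalizing a with
  | nil => left; rfl
  | cons e rest ih =>
    simp only [List.foldl]
    rcases ih (max a e) with h | h
    · rw [h]
      by_cases hea : e ≤ a
      · left; exact max_eq_left hea
      · right
        rw [max_eq_right (le_of_lt (not_le.mp hea))]
        exact List.mem_cons_self
    · right; exact List.mem_cons_of_mem _ h

theorem le_foldl_max (l : List Int) (a : Int) : a ≤ l.foldl max a := by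
  induction l generalizing a with
  | nil => exact le_refl a
  | cons e rest ih => exact le_trans (le_max_left a e) (ih (max a e))

theorem mem_le_foldl_max (l : List Int) (a : Int) (e : Int) (h : e ∈ l) : e ≤ l.foldl max a := by
  induction l generalizing a with
  | nil => cases h
  | cons x rest ih =>
    rcases List.mem_cons.mp h with rfl | h'
    · exact le_trans (le_max_right a e) (le_foldl_max rest _)
    · exact ih _ h'

theorem foldl_max_comm (l : List Int) (a b : Int) :
    l.foldl max (max a b) = max a (l.foldl max b) := by
  induction l generalizing b with
  | nil => rfl
  | cons e rest ih =>
    simp only [List.foldl]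
    rw [max_assoc, ih]

theorem fidx_none_of_not_mem (m : Int) (l : List Int) (h : m ∉ l) : fidx m l = none := by
  induction l with
  | nil => rfl
  | cons e rest ih =>
    simp only [List.mem_cons, not_or] at h
    simp [fidx, Ne.symm h.1, ih h.2]

theorem fidx_some_of_mem (m : Int) (l : List Int) (h : m ∈ l) : ∃ k, fidx m l = some k := by
  induction l with
  | nil => cases h
  | cons e rest ih =>
    by_cases he : e = m
    · exact ⟨0, by simp [fidx, he]⟩
    · rcases ih (by rcases List.mem_cons.mp h with rfl | h'; exact absurd rfl he; exact h') with ⟨k, hk⟩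
      exact ⟨k + 1, by simp [fidx, he, hk]⟩

theorem not_mem_of_fidx_none (m : Int) (l : List Int) (h : fidx m l = none) : m ∉ l := by
  intro hmem
  rcases fidx_some_of_mem m l hmem with ⟨k, hk⟩
  rw [hk] at h
  cases h

theorem fpos_some_of_mem (m : Int) (rows : List (List Int)) (h : m ∈ rows.flatten) :
    ∃ p, fpos m rows = some p := by
  induction rows with
  | nil => simp at h
  | cons row rows ih =>
    cases hf : fidx m row with
    | some j => exact ⟨(0, j), by simp [fpos, hf]⟩
    | none =>
      have hmem : m ∈ rows.flatten := by
        rw [List.flatten_cons] at h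
        rcases List.mem_append.mp h with h' | h'
        · exact absurd h' (not_mem_of_fidx_none m row hf)
        · exact h'
      rcases ih hmem with ⟨p, hp⟩
      exact ⟨(p.1 + 1, p.2), by simp [fpos, hf, hp]⟩

-- A's inner loop computes (running max, position of its first occurrence)
theorem scanA (l : List Int) (i j : Nat) (v : Int) (r : Int × Int) :
    goAInner i j (v, r) l =
      (l.foldl max v,
       if l.foldl max v > v
       then ((i : Int), ((j + (fidx (l.foldl max v) l).getD 0 : Nat) : Int))
       else r) := by
  induction l generalizing j v r with
  | nil => simp [goAInner]
  | cons e rest ih =>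
    simp only [goAInner, List.foldl]
    by_cases hev : e > v
    · rw [if_pos hev]
      have hmax : max v e = e := max_eq_right (le_of_lt hev)
      rw [hmax]
      rw [ih (j + 1) e ((i : Int), (j : Int))]
      by_cases hM : rest.foldl max e > e
      · rw [if_pos hM, if_pos (by omega)]
        have hne : e ≠ rest.foldl max e := by omega
        have hmem : rest.foldl max e ∈ rest := by
          rcases foldl_max_or rest e with h | h
          · omega
          · exact h
        rcases fidx_some_of_mem _ _ hmem with ⟨k, hk⟩
        simp [fidx, hne, hk]
        omega
      · rw [if_neg hM]
        have he : rest.foldl max e = e := le_antisymm (by omega) (le_foldl_max rest e)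
        rw [he, if_pos hev]
        simp [fidx]
    · rw [if_neg hev]
      have hmax : max v e = v := max_eq_left (by omega)
      rw [hmax, ih (j + 1) v r]
      by_cases hM : rest.foldl max v > v
      · rw [if_pos hM, if_pos hM]
        have hne : e ≠ rest.foldl max v := by omega
        have hmem : rest.foldl max v ∈ rest := by
          rcases foldl_max_or rest v with h | h
          · omega
          · exact h
        rcases fidx_some_of_mem _ _ hmem with ⟨k, hk⟩
        simp [fidx, hne, hk]
        omega
      · rw [if_neg hM, if_neg hM]

-- A's outer loop: (global running max, position of its first row-major occurrence)
theorem scanAouter (rows : List (List Int)) (i : Nat) (v : Int) (r : Int × Int) :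
    goA i (v, r) rows =
      (rows.flatten.foldl max v,
       if rows.flatten.foldl max v > v
       then (match fpos (rows.flatten.foldl max v) rows with
             | some p => (((i + p.1 : Nat) : Int), ((p.2 : Nat) : Int))
             | none => r)
       else r) := by
  induction rows generalizing i v r with
  | nil => simp [goA]
  | cons row rows ih =>
    have hkey : ((row :: rows).flatten).foldl max v = rows.flatten.foldl max (row.foldl max v) := by
      rw [List.flatten_cons, List.foldl_append]
    simp only [goA]
    rw [scanA, hkey]
    set v1 := row.foldl max v with hv1
    set M := rows.flatten.foldl max v1 with hMdef
    have hv1le : v ≤ v1 := le_foldl_max row v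
    have hv1M : v1 ≤ M := le_foldl_max _ v1
    rw [ih]
    by_cases hM1 : M > v1
    · -- the maximum comes from the later rows
      rw [if_pos hM1, if_pos (lt_of_le_of_lt hv1le hM1)]
      have hnotrow : fidx M row = none := by
        apply fidx_none_of_not_mem
        intro hmem
        have := mem_le_foldl_max row v M hmem
        omega
      simp only [fpos, hnotrow]
      rcases fpos_some_of_mem M rows (by
        rcases foldl_max_or rows.flatten v1 with h | h
        · exact absurd h (ne_of_gt hM1)
        · exact h) with ⟨p, hfp⟩
      rw [hfp]
      simp only [Option.map_some]
      simp
      omega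
    · rw [if_neg hM1]
      have hMv1 : M = v1 := le_antisymm (by omega) hv1M
      by_cases hv : v1 > v
      · -- the maximum is in this row
        rw [if_pos hv, if_pos (by rw [hMv1]; exact hv)]
        have hmem : v1 ∈ row := by
          rcases foldl_max_or row v with h | h
          · exact absurd h (ne_of_gt hv)
          · exact h
        rcases fidx_some_of_mem v1 row hmem with ⟨k, hk⟩
        simp only [fpos, hMv1, hk]
        simp
        exact hMv1
      · have hvv : v1 = v := le_antisymm (not_lt.mp hv) hv1le
        have hMle : M ≤ v := le_trans (not_lt.mp hM1) (le_of_eq hvv)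
        rw [if_neg hv, if_neg (not_lt.mpr hMle)]


theorem rowMax_cons (f : Int) (rs : List Int) : rowMax (f :: rs) = rs.foldl max f := by
  simp [rowMax, PySem.List.max?_id_cons]

theorem index?_eq_fidx (l : List Int) (m : Int) : PySem.List.index? l m = fidx m l := by
  induction l with
  | nil => rfl
  | cons x l ih =>
    by_cases hx : x = m
    · subst hx; rw [PySem.List.index?_cons_self]; simp [fidx]
    · rw [PySem.List.index?_cons_of_ne l hx, ih]; simp [fidx, hx]

theorem foldl_rowMax (rows : List (List Int)) (a : Int) :
    ((rows.filter (fun r => !r.isEmpty)).map rowMax).foldl max a = rows.flatten.foldl max a := by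
  induction rows generalizing a with
  | nil => rfl
  | cons row rows ih =>
    cases row with
    | nil => simpa [List.filter, List.flatten] using ih a
    | cons f rs =>
      have h1 : ((f :: rs) :: rows).filter (fun r => !r.isEmpty)
          = (f :: rs) :: rows.filter (fun r => !r.isEmpty) := by simp
      rw [h1, List.map_cons, List.foldl_cons, ih, List.flatten_cons, List.foldl_append, rowMax_cons]
      congr 1
      rw [List.foldl_cons]
      exact (foldl_max_comm rs a f).symm

theorem findB_eq (m : Int) (rows : List (List Int)) (i : Nat) :
    findB m i rows =
      match fpos m rows with
      | some p => (((i + p.1 : Nat) : Int), ((p.2 : Nat) : Int))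
      | none => (0, 0) := by
  induction rows generalizing i with
  | nil => rfl
  | cons row rows ih =>
    by_cases hm : m ∈ row
    · rcases fidx_some_of_mem m row hm with ⟨j, hj⟩
      simp [findB, hm, fpos, hj]
      have h := index?_eq_fidx row m
      rw [PySem.List.index?_eq_idxOf?] at h
      rw [h, hj]
      rfl
    · have hf : fidx m row = none := fidx_none_of_not_mem m row hm
      simp only [findB, if_neg hm, fpos, hf]
      rw [ih (i + 1)]
      cases hp : fpos m rows with
      | none => simp
      | some p => simp; omega

-- ===== VERDICT (by name: the statement is the Claim_ definition above) =====
theorem get_max_element_index_from_2d_matrix_spec : Claim_equal_get_max_element_index_from_2d_matrix := by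
  intro matrix _ hpre
  obtain ⟨h1, h2⟩ := hpre
  unfold Spec_get_max_element_index_from_2d_matrix
  cases matrix with
  | nil => exact absurd rfl h1
  | cons row rows =>
    cases row with
    | nil => simp [List.headD] at h2
    | cons e rest =>
      set M := ((e :: rest) :: rows).flatten.foldl max e with hM
      have hg : gmax ((e :: rest) :: rows) = some M := by
        have hfil : ((e :: rest) :: rows).filter (fun r => !r.isEmpty)
            = (e :: rest) :: rows.filter (fun r => !r.isEmpty) := by simp
        simp only [gmax]
        rw [hfil, List.map_cons, PySem.List.max?_id_cons, foldl_rowMax, rowMax_cons]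
        congr 1
        rw [hM, List.flatten_cons, List.foldl_append, List.foldl_cons, max_self]
      have hBside : get_max_element_index_from_2d_matrix_alt ((e :: rest) :: rows)
          = findB M 0 ((e :: rest) :: rows) := by
        unfold get_max_element_index_from_2d_matrix_alt
        rw [hg]
      rw [hBside, findB_eq]
      simp only [get_max_element_index_from_2d_matrix, PySem.List.pyGet?_zero_cons,
        Option.bind_some]
      rw [scanAouter, ← hM]
      have heM : e ≤ M := by rw [hM]; exact le_foldl_max _ _
      by_cases hMe : M > e
      · rw [if_pos hMe]
      · rw [if_neg hMe]
        have hMeq : M = e := le_antisymm (not_lt.mp hMe) heM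
        have hfid : fidx M (e :: rest) = some 0 := by simp [fidx, hMeq]
        simp [fpos, hfid]
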